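-- pv_equiv track=rewrite | github.com/tokarev48/tkrvzz | ДЗ-9/2.py | minMult
-- ===== SOURCE A (Python) =====
-- def minMult(matrix):
--     column = 0
--     mult = 1
--     min = 10000000
--     for i in range(len(matrix)):
--         mult = 1
--         for j in range(len(matrix)):
--             mult *= matrix[j][i]
--         if (mult < min):
--             min = mult
--             column = i
--     return column
-- ===== SOURCE B (Python) =====
-- def minMult(matrix):
--     n = len(matrix)
--     products = [1] * n
--     for row in matrix:
--         products = [p * x for p, x in zip(products, row)]
--     col = 0
--     best = 10000000
--     for i in range(n):
--         if products[i] < best: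
--             best = products[i]
--             col = i
--     return col
-- ===== Notes on version B (the rewrite author's own statement) =====
-- stated objective: alternative
-- what changed: Replaces the nested index loops (re-scanning all rows per column with matrix[j][i]) by a single row-wise pass that zips a running product list with each row, followed by a separate min-scan pass.
import Mathlib
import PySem

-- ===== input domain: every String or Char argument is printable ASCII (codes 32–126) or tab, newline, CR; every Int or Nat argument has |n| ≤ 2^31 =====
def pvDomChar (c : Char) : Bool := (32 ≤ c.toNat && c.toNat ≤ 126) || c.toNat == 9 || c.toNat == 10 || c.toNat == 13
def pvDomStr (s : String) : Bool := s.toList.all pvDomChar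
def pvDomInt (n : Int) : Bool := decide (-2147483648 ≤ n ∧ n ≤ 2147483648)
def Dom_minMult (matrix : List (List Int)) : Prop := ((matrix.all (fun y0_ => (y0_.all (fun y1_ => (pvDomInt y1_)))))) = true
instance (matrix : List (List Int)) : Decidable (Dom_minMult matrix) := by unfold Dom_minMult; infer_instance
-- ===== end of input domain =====

-- B replaces A's per-column re-scan (nested index loops) by one row-wise pass that
-- multiplies a running product list with each row via zip, then a final scan; same cost class.

-- ===== PORT A =====
def minMult (matrix : List (List Int)) : Int :=
  let n : Int := (matrix.length : Int)
  ((PySem.List.pyRange 0 n 1).foldl (fun st i =>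
      let mult := (PySem.List.pyRange 0 n 1).foldl (fun m j =>
          m * PySem.List.pyGetD (PySem.List.pyGetD matrix j []) i 0) 1
      if mult < st.2 then (i, mult) else st) (0, 10000000)).1

-- ===== PORT B =====
def minMult_alt (matrix : List (List Int)) : Int :=
  let n : Int := (matrix.length : Int)
  let products := matrix.foldl (fun ps row => List.zipWith (fun p x => p * x) ps row)
      (List.replicate matrix.length 1)
  ((PySem.List.pyRange 0 n 1).foldl (fun st i =>
      let p := PySem.List.pyGetD products i 0
      if p < st.2 then (i, p) else st) (0, 10000000)).1

-- ===== PRECONDITION & SPEC =====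
-- Pre_ excludes exactly the inputs where Python A raises IndexError: some row shorter than len(matrix).
def Pre_minMult (matrix : List (List Int)) : Prop :=
  ∀ row ∈ matrix, matrix.length ≤ row.length
instance (matrix : List (List Int)) : Decidable (Pre_minMult matrix) := by
  unfold Pre_minMult; infer_instance
def pvWitness_minMult : List (List Int) := [[1, 2], [3, 4]]

def Spec_minMult (matrix : List (List Int)) (out : Int) : Prop := out = minMult_alt matrix
instance (matrix : List (List Int)) (out : Int) : Decidable (Spec_minMult matrix out) := by unfold Spec_minMult; infer_instance

-- ===== CLAIM (what is proved, stated in full; the proofs are below) =====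
def Claim_equal_minMult : Prop := ∀ (matrix : List (List Int)), Dom_minMult matrix → Pre_minMult matrix → Spec_minMult matrix (minMult matrix)

-- ===== LEMMAS AND PROOFS =====

-- the product of column i (Python index semantics for the row access)
def colProd (rows : List (List Int)) (i : Int) : Int :=
  rows.foldl (fun m row => m * PySem.List.pyGetD row i 0) 1

theorem foldl_mul_init (g : List Int → Int) (a : Int) (rows : List (List Int)) :
    rows.foldl (fun m row => m * g row) a = a * rows.foldl (fun m row => m * g row) 1 := by
  induction rows generalizing a with
  | nil => simp
  | cons r rs ih =>
      simp only [List.foldl_cons]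
      rw [ih (a * g r), ih (1 * g r)]
      ring

theorem prod_getD (rows : List (List Int)) (ps : List Int) (k : Nat)
    (hk : k < ps.length) (h : ∀ row ∈ rows, ps.length ≤ row.length) :
    (rows.foldl (fun ps row => List.zipWith (fun p x => p * x) ps row) ps).getD k 0
      = ps.getD k 0 * colProd rows (k : Int) := by
  induction rows generalizing ps with
  | nil => simp [colProd]
  | cons r rs ih =>
      simp only [List.foldl_cons]
      have hr := h r (by simp)
      have hlen : (List.zipWith (fun p x => p * x) ps r).length = ps.length := by
        simp only [List.length_zipWith]; omega
      rw [ih (List.zipWith (fun p x => p * x) ps r) (by omega)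
          (by intro row hrow; rw [hlen]; exact h row (by simp [hrow]))]
      have hz : (List.zipWith (fun p x => p * x) ps r).getD k 0 = ps.getD k 0 * r.getD k 0 := by
        have hk2 : k < r.length := by omega
        rw [List.getD_eq_getElem _ _ (by omega), List.getD_eq_getElem _ _ hk,
            List.getD_eq_getElem _ _ hk2, List.getElem_zipWith]
      rw [hz]
      have hcol : colProd (r :: rs) (k : Int) = r.getD k 0 * colProd rs (k : Int) := by
        unfold colProd
        simp only [List.foldl_cons, PySem.List.pyGetD_natCast]
        rw [foldl_mul_init (fun row => List.getD row k 0) (1 * r.getD k 0)]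
        ring
      rw [hcol]; ring

theorem foldl_range_congr {α : Type} (l : List Int) (f g : α → Int → α) (init : α)
    (h : ∀ a i, i ∈ l → f a i = g a i) : l.foldl f init = l.foldl g init := by
  induction l generalizing init with
  | nil => rfl
  | cons x xs ih =>
      simp only [List.foldl_cons]
      rw [h init x (by simp)]
      exact ih _ (fun a i hi => h a i (by simp [hi]))

-- ===== VERDICT (by name: the statement is the Claim_ definition above) =====
theorem minMult_spec : Claim_equal_minMult := by
  intro matrix _ hpre
  unfold Spec_minMult minMult minMult_alt
  simp only []
  congr 1
  apply foldl_range_congr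
  intro a i hi
  have hi' : 0 ≤ i ∧ i < (matrix.length : Int) := by
    rw [PySem.List.mem_pyRange_one] at hi; exact hi
  -- A's inner loop computes colProd matrix i
  have hA : (PySem.List.pyRange 0 (matrix.length : Int) 1).foldl (fun m j =>
      m * PySem.List.pyGetD (PySem.List.pyGetD matrix j []) i 0) 1 = colProd matrix i := by
    exact PySem.List.foldl_pyRange_zero_pyGetD' matrix []
      (fun m row => m * PySem.List.pyGetD row i 0) 1
  -- B's products list holds colProd at index i
  have hB : PySem.List.pyGetD
      (matrix.foldl (fun ps row => List.zipWith (fun p x => p * x) ps row)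
        (List.replicate matrix.length 1)) i 0 = colProd matrix i := by
    have h0 : i = ((i.toNat : Nat) : Int) := by omega
    rw [h0, PySem.List.pyGetD_natCast,
        prod_getD matrix (List.replicate matrix.length 1) i.toNat
          (by simp; omega) (by intro row hrow; simpa using hpre row hrow)]
    have hlt : i.toNat < matrix.length := by omega
    simp [hlt]
  rw [hA, hB]
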